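-- pv_equiv track=rewrite | github.com/alephao/solidity-benchmarks | scripts/common.py | group_by_method
-- ===== SOURCE A (Python) =====
-- from itertools import groupby
--
-- def group_by_method(lines):
--     grouped_by_method = groupby(lines, lambda x: x.split("_")[2])
--     grouped_by_method_dict = {}
--     for key, elements in grouped_by_method:
--         if key in grouped_by_method_dict:
--             grouped_by_method_dict[key] = grouped_by_method_dict[key] + \
--                 list(elements)
--         else:
--             grouped_by_method_dict[key] = list(elements)
--     return grouped_by_method_dict
-- ===== SOURCE B (Python) =====
-- def group_by_method(lines):
--     result = {}
--     for line in lines: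
--         result.setdefault(line.split("_")[2], []).append(line)
--     return result
-- ===== Notes on version B (the rewrite author's own statement) =====
-- stated objective: simpler
-- what changed: Replaces itertools.groupby (consecutive runs) plus an if-key-present concatenation merge with a single flat pass appending each line to dict.setdefault per key.
import Mathlib
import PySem

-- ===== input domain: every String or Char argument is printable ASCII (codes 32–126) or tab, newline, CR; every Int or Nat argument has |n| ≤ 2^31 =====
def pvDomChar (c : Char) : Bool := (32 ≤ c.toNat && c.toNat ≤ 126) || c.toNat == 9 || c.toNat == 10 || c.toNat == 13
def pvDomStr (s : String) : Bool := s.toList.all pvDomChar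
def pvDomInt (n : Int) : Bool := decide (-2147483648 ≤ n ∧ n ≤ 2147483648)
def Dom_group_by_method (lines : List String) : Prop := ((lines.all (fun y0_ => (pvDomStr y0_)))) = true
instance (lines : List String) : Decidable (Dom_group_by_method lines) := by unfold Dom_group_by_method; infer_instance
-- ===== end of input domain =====

-- B drops itertools.groupby's runs-then-merge in favour of one flat setdefault pass per line; same O(n) cost.


-- ===== PORT A =====
-- shared key helper: x.split("_")[2]; the default "" is never reached inside Pre_ (index in range there)
def pvKey (l : String) : String := PySem.List.pyGetD ((PySem.Str.split? l "_").getD []) 2 ""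

-- itertools.groupby(lines, key): consecutive runs with equal key
def pvGroupby : List String → List (String × List String)
  | [] => []
  | x :: xs =>
    (pvKey x, x :: xs.takeWhile (fun y => pvKey y == pvKey x)) ::
      pvGroupby (xs.dropWhile (fun y => pvKey y == pvKey x))
termination_by l => l.length
decreasing_by
  simp only [List.length_cons]
  exact Nat.lt_succ_of_le (List.length_dropWhile_le _ _)

def group_by_method (lines : List String) : List (String × List String) :=
  ((pvGroupby lines).foldl
    (fun d p =>
      if d.contains p.1 then d.insert p.1 (d.getD p.1 [] ++ p.2)
      else d.insert p.1 p.2)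
    PySem.Dict.empty).items

-- ===== PORT B =====
def group_by_method_alt (lines : List String) : List (String × List String) :=
  (lines.foldl
    (fun d l => d.insert (pvKey l) (d.getD (pvKey l) [] ++ [l]))
    PySem.Dict.empty).items

-- ===== PRECONDITION & SPEC =====
-- Pre_ excludes exactly the lines with fewer than three "_"-separated tokens, on which A's x.split("_")[2] raises IndexError.
def Pre_group_by_method (lines : List String) : Prop :=
  ∀ l ∈ lines, 2 < ((PySem.Str.split? l "_").getD []).length
instance (lines : List String) : Decidable (Pre_group_by_method lines) := by
  unfold Pre_group_by_method; infer_instance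

def pvWitness_group_by_method : List String := ["a_b_c", "a_b_c_d", "x_y_c"]

def Spec_group_by_method (lines : List String) (out : List (String × List String)) : Prop := out = group_by_method_alt lines
instance (lines : List String) (out : List (String × List String)) : Decidable (Spec_group_by_method lines out) := by unfold Spec_group_by_method; infer_instance

-- ===== CLAIM (what is proved, stated in full; the proofs are below) =====
def Claim_equal_group_by_method : Prop := ∀ (lines : List String), Dom_group_by_method lines → Pre_group_by_method lines → Spec_group_by_method lines (group_by_method lines)

-- ===== LEMMAS AND PROOFS =====

-- B's per-line step
def pvStep (d : PySem.Dict String (List String)) (l : String) : PySem.Dict String (List String) :=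
  d.insert (pvKey l) (d.getD (pvKey l) [] ++ [l])

-- folding B's step over a nonempty run whose elements all share key k is one combined insert
lemma pvFoldRun (run : List String) (k : String) :
    ∀ (d : PySem.Dict String (List String)), run ≠ [] → (∀ y ∈ run, pvKey y = k) →
    run.foldl pvStep d = d.insert k (d.getD k [] ++ run) := by
  induction run with
  | nil => intro d h _; exact absurd rfl h
  | cons a rest ih =>
    intro d _ hk
    have hak : pvKey a = k := hk a (by simp)
    simp only [List.foldl_cons]
    rcases rest with _ | ⟨b, rest'⟩
    · simp [pvStep, hak]
    · rw [ih _ (by simp) (fun y hy => hk y (List.mem_cons_of_mem a hy))]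
      rw [pvStep, hak, PySem.Dict.getD_insert_self, PySem.Dict.insert_insert_self]
      simp

-- A's if-key-present merge of a run is one combined insert
lemma pvMerge (d : PySem.Dict String (List String)) (k : String) (run : List String) :
    (if d.contains k then d.insert k (d.getD k [] ++ run) else d.insert k run)
    = d.insert k (d.getD k [] ++ run) := by
  split_ifs with hc
  · rfl
  · rw [PySem.Dict.getD_of_not_contains d [] (by simpa using hc)]
    simp

-- A's merge fold over groupby's runs equals B's flat fold
lemma pvGroupbyFold (ls : List String) :
    ∀ (d : PySem.Dict String (List String)),
    (pvGroupby ls).foldl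
      (fun d p =>
        if d.contains p.1 then d.insert p.1 (d.getD p.1 [] ++ p.2)
        else d.insert p.1 p.2) d
    = ls.foldl pvStep d := by
  induction ls using pvGroupby.induct with
  | case1 => intro d; simp [pvGroupby]
  | case2 x xs ih =>
    intro d
    rw [pvGroupby]
    simp only [List.foldl_cons]
    rw [ih, pvMerge]
    have hrun : (x :: xs.takeWhile (fun y => pvKey y == pvKey x)).foldl pvStep d
        = d.insert (pvKey x) (d.getD (pvKey x) [] ++ (x :: xs.takeWhile (fun y => pvKey y == pvKey x))) := by
      apply pvFoldRun _ _ d (by simp)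
      intro y hy
      rcases List.mem_cons.mp hy with h | h
      · simp [h]
      · have hb : (pvKey y == pvKey x) = true := List.mem_takeWhile_imp (p := fun y => pvKey y == pvKey x) h
        exact eq_of_beq hb
    rw [← hrun, ← List.foldl_append, List.cons_append, List.takeWhile_append_dropWhile,
        List.foldl_cons]

-- ===== VERDICT (by name: the statement is the Claim_ definition above) =====
theorem group_by_method_spec : Claim_equal_group_by_method := by
  intro lines _ _
  show group_by_method lines = group_by_method_alt lines
  unfold group_by_method group_by_method_alt
  rw [pvGroupbyFold]
  rfl
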